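-- pv_equiv track=rewrite | github.com/do-develop/python_practice | leet2018_check_if_word_can_be_placed_in_crossword.py | placeWordInCrossword
-- ===== SOURCE A (Python) =====
-- from typing import List
--
-- def placeWordInCrossword(board: List[List[str]], word: str) -> bool:
--     words = [word, word[::-1]]
--     N = len(word)
--     for B in board, zip(*board):
--         for row in B:
--             q = ''.join(row).split('#')
--             for w in words:
--                 for s in q:
--                     if len(s) == N:
--                         if all(s[i] == w[i] or s[i] == ' ' for i in range(N)):
--                             return True
--     return False
-- ===== SOURCE B (Python) =====
-- def placeWordInCrossword(board, word):
--     # One streaming pass per line: track run length and forward/backward match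
--     # flags, checking each '#'-delimited run as it closes (sentinel '#' at end).
--     N = len(word)
--
--     def scan(line):
--         cnt, fwd, bwd = 0, True, True
--         for ch in line + '#':
--             if ch == '#':
--                 if cnt == N and (fwd or bwd):
--                     return True
--                 cnt, fwd, bwd = 0, True, True
--             else:
--                 if cnt < N:
--                     fwd = fwd and (ch == word[cnt] or ch == ' ')
--                     bwd = bwd and (ch == word[N - 1 - cnt] or ch == ' ')
--                 cnt += 1
--         return False
--
--     lines = [''.join(r) for r in board] + [''.join(t) for t in zip(*board)]
--     return any(scan(line) for line in lines)
-- ===== Notes on version B (the rewrite author's own statement) =====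
-- stated objective: alternative
-- what changed: Instead of joining each line, splitting it on '#' and re-checking every segment against word and reversed word with an index comprehension, B streams each line once through a run-length counter with forward/backward match flags, checking a run as it closes.
import Mathlib
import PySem

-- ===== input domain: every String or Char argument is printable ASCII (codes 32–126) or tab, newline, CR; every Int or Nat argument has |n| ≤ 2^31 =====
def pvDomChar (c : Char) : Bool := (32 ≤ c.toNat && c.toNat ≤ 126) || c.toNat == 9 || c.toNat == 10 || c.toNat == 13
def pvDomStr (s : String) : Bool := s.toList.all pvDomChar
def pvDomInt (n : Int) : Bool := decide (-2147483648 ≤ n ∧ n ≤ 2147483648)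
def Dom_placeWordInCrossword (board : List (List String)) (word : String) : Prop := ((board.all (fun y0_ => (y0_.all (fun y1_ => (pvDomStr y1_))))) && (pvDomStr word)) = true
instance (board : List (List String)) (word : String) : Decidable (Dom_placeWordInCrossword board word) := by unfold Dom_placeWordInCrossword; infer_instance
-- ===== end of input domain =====

-- B replaces A's split-into-segments-and-recheck-by-comprehension with a single streaming
-- pass per line keeping a run length and forward/backward match flags (objective: alternative).

-- shared helper: Python's zip(*board) — columns truncated to the shortest row
def pyZipStar (rows : List (List String)) : List (List String) :=
  match rows with
  | [] => []
  | r0 :: rest =>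
      let m := (rest.map List.length).foldl min r0.length
      (List.range m).map (fun j => (r0 :: rest).map (fun r => r.getD j ""))

-- ===== PORT A =====
-- all(s[i] == w[i] or s[i] == ' ' for i in range(N))
def allMatchA (N : Nat) (s v : List Char) : Bool :=
  (List.range N).all (fun i => (s.getD i ' ' == v.getD i ' ') || (s.getD i ' ' == ' '))

def placeWordInCrossword (board : List (List String)) (word : String) : Bool :=
  let words := [word.toList, word.toList.reverse]   -- [word, word[::-1]]
  let N := word.toList.length                        -- len(word)
  [board, pyZipStar board].any (fun B =>
    B.any (fun row =>
      let q := PySem.Chars.splitOn (PySem.Chars.join [] (row.map String.toList)) ['#']  -- ''.join(row).split('#')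
      words.any (fun w => q.any (fun s => s.length == N && allMatchA N s w))))

-- ===== PORT B =====
-- one step of the streaming scan: state (found, cnt, fwd, bwd)
def scanStep (w : List Char) (N : Nat) (st : Bool × Nat × Bool × Bool) (c : Char) :
    Bool × Nat × Bool × Bool :=
  if c == '#' then
    (st.1 || (st.2.1 == N && (st.2.2.1 || st.2.2.2)), 0, true, true)
  else
    let fwd := if st.2.1 < N then st.2.2.1 && (c == w.getD st.2.1 ' ' || c == ' ') else st.2.2.1
    let bwd := if st.2.1 < N then st.2.2.2 && (c == w.getD (N - 1 - st.2.1) ' ' || c == ' ') else st.2.2.2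
    (st.1, st.2.1 + 1, fwd, bwd)

-- scan(line): stream line + '#' through scanStep (early return modelled by the sticky found flag)
def scanLine (w : List Char) (N : Nat) (line : List Char) : Bool :=
  ((line ++ ['#']).foldl (scanStep w N) (false, 0, true, true)).1

def placeWordInCrossword_alt (board : List (List String)) (word : String) : Bool :=
  let w := word.toList
  let N := w.length
  (board.map (fun r => PySem.Chars.join [] (r.map String.toList))
    ++ (pyZipStar board).map (fun r => PySem.Chars.join [] (r.map String.toList))).any
    (scanLine w N)

-- ===== PRECONDITION & SPEC =====
def Spec_placeWordInCrossword (board : List (List String)) (word : String) (out : Bool) : Prop := out = placeWordInCrossword_alt board word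
instance (board : List (List String)) (word : String) (out : Bool) : Decidable (Spec_placeWordInCrossword board word out) := by unfold Spec_placeWordInCrossword; infer_instance

-- ===== CLAIM (what is proved, stated in full; the proofs are below) =====
def Claim_equal_placeWordInCrossword : Prop := ∀ (board : List (List String)) (word : String), Dom_placeWordInCrossword board word → Spec_placeWordInCrossword board word (placeWordInCrossword board word)

-- ===== LEMMAS AND PROOFS =====

-- reference version of ''.split('#') (cur = current segment, reversed)
def splitRef (cur : List Char) : List Char → List (List Char)
  | [] => [cur.reverse]
  | c :: rest => if c = '#' then cur.reverse :: splitRef [] rest else splitRef (c :: cur) rest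

theorem go_eq (fuel : Nat) (l cur : List Char) (acc : List (List Char)) (h : l.length < fuel) :
    PySem.Chars.splitOn.go ['#'] fuel l cur acc = acc.reverse ++ splitRef cur l := by
  induction fuel generalizing l cur acc with
  | zero => omega
  | succ fuel ih =>
    cases l with
    | nil => simp [PySem.Chars.splitOn.go, splitRef]
    | cons c rest =>
      by_cases hc : c = '#'
      · subst hc
        simp only [PySem.Chars.splitOn.go, List.isPrefixOf, BEq.rfl, Bool.true_and, if_true]
        rw [show List.drop ['#'].length ('#' :: rest) = rest from rfl,
          ih rest [] (cur.reverse :: acc) (by simpa using Nat.lt_of_succ_lt_succ h)]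
        simp [splitRef]
      · have : (['#'].isPrefixOf (c :: rest)) = false := by
          simp [List.isPrefixOf]; exact fun hh => hc hh.symm
        rw [show PySem.Chars.splitOn.go ['#'] (fuel + 1) (c :: rest) cur acc
              = PySem.Chars.splitOn.go ['#'] fuel rest (c :: cur) acc from by
            simp [PySem.Chars.splitOn.go, this],
          ih rest (c :: cur) acc (by simpa using Nat.lt_of_succ_lt_succ h)]
        simp [splitRef, hc]

theorem splitOn_eq (l : List Char) :
    PySem.Chars.splitOn l ['#'] = splitRef [] l := by
  unfold PySem.Chars.splitOn
  rw [go_eq _ _ _ _ (by omega)]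
  simp

-- forward / backward run predicates accumulated by the scan
def runF (w : List Char) (N : Nat) : Nat → List Char → Bool
  | _, [] => true
  | cnt, c :: cs =>
      (if cnt < N then (c == w.getD cnt ' ' || c == ' ') else true) && runF w N (cnt + 1) cs

def runB (w : List Char) (N : Nat) : Nat → List Char → Bool
  | _, [] => true
  | cnt, c :: cs =>
      (if cnt < N then (c == w.getD (N - 1 - cnt) ' ' || c == ' ') else true) && runB w N (cnt + 1) cs

theorem runF_append (w : List Char) (N : Nat) (xs ys : List Char) :
    ∀ cnt, runF w N cnt (xs ++ ys) = (runF w N cnt xs && runF w N (cnt + xs.length) ys) := by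
  induction xs with
  | nil => intro cnt; simp [runF]
  | cons c cs ih => intro cnt; simp [runF, ih, Bool.and_assoc, Nat.add_assoc, Nat.add_comm 1]

theorem runB_append (w : List Char) (N : Nat) (xs ys : List Char) :
    ∀ cnt, runB w N cnt (xs ++ ys) = (runB w N cnt xs && runB w N (cnt + xs.length) ys) := by
  induction xs with
  | nil => intro cnt; simp [runB]
  | cons c cs ih => intro cnt; simp [runB, ih, Bool.and_assoc, Nat.add_assoc, Nat.add_comm 1]

theorem runF_bridge (w : List Char) (N : Nat) :
    ∀ (s : List Char) (cnt : Nat), cnt + s.length = N →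
      runF w N cnt s =
        (List.range s.length).all (fun i => (s.getD i ' ' == w.getD (cnt + i) ' ') || (s.getD i ' ' == ' ')) := by
  intro s
  induction s with
  | nil => intro cnt h; simp [runF]
  | cons c cs ih =>
    intro cnt h
    have hlt : cnt < N := by simp at h; omega
    have hih := ih (cnt + 1) (by simp at h ⊢; omega)
    simp only [runF, if_pos hlt, List.length_cons, List.range_succ_eq_map, List.all_cons,
      List.all_map, hih]
    refine congrArg₂ (· && ·) ?_ ?_
    · simp [List.getD]
    · refine List.all_congr rfl (fun i => ?_)
      have h2 : cnt + 1 + i = cnt + (i + 1) := by omega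
      simp [Function.comp, h2]

theorem runB_bridge (w : List Char) (N : Nat) :
    ∀ (s : List Char) (cnt : Nat), cnt + s.length = N →
      runB w N cnt s =
        (List.range s.length).all (fun i => (s.getD i ' ' == w.getD (N - 1 - (cnt + i)) ' ') || (s.getD i ' ' == ' ')) := by
  intro s
  induction s with
  | nil => intro cnt h; simp [runB]
  | cons c cs ih =>
    intro cnt h
    have hlt : cnt < N := by simp at h; omega
    have hih := ih (cnt + 1) (by simp at h ⊢; omega)
    simp only [runB, if_pos hlt, List.length_cons, List.range_succ_eq_map, List.all_cons,
      List.all_map, hih]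
    refine congrArg₂ (· && ·) ?_ ?_
    · simp [List.getD]
    · refine List.all_congr rfl (fun i => ?_)
      have h2 : cnt + 1 + i = cnt + (i + 1) := by omega
      simp [Function.comp, h2]

theorem getD_reverse (w : List Char) (i : Nat) (hi : i < w.length) :
    w.reverse.getD i ' ' = w.getD (w.length - 1 - i) ' ' := by
  simp [List.getD, List.getElem?_reverse hi,
    List.getElem?_eq_getElem (by omega : w.length - 1 - i < w.length)]

theorem all_congr_mem {α : Type} (l : List α) (p q : α → Bool)
    (h : ∀ a ∈ l, p a = q a) : l.all p = l.all q := by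
  induction l with
  | nil => rfl
  | cons a l ih => simp only [List.all_cons, h a (by simp), ih (fun b hb => h b (by simp [hb]))]

-- closing a run: the streamed check equals A's segment check
theorem check_eq (w : List Char) (s : List Char) :
    (s.length == w.length && (runF w w.length 0 s || runB w w.length 0 s))
      = (s.length == w.length && (allMatchA w.length s w || allMatchA w.length s w.reverse)) := by
  by_cases hl : s.length = w.length
  · have hf := runF_bridge w w.length s 0 (by omega)
    have hb := runB_bridge w w.length s 0 (by omega)
    simp only [hf, hb, allMatchA, hl]
    refine congrArg₂ (· && ·) rfl (congrArg₂ (· || ·) ?_ ?_)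
    · refine all_congr_mem _ _ _ (fun i _ => by simp)
    · refine all_congr_mem _ _ _ (fun i hi => ?_)
      simp only [List.mem_range] at hi
      have h0 : 0 + i = i := by omega
      rw [h0, getD_reverse w i (by omega)]
  · have hne : (s.length == w.length) = false := by simpa using hl
    rw [hne]
    simp

theorem scan_eq (w : List Char) :
    ∀ (l cur : List Char) (f0 : Bool),
      ((l ++ ['#']).foldl (scanStep w w.length)
          (f0, cur.length, runF w w.length 0 cur.reverse, runB w w.length 0 cur.reverse)).1
        = (f0 || (splitRef cur l).any
            (fun s => s.length == w.length && (allMatchA w.length s w || allMatchA w.length s w.reverse))) := by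
  intro l
  induction l with
  | nil =>
    intro cur f0
    simp only [List.nil_append, List.foldl_cons, List.foldl_nil, scanStep, BEq.rfl, if_true]
    rw [← List.length_reverse (as := cur), check_eq]
    simp [splitRef]
  | cons c rest ih =>
    intro cur f0
    by_cases hc : c = '#'
    · subst hc
      have h0 : (0 : Nat) = List.length ([] : List Char) := rfl
      simp only [List.cons_append, List.foldl_cons, scanStep, BEq.rfl, if_true]
      rw [← List.length_reverse (as := cur), check_eq, List.length_reverse]
      have := ih [] (f0 || (cur.length == w.length && (allMatchA w.length cur.reverse w || allMatchA w.length cur.reverse w.reverse)))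
      simp only [List.length_nil, List.reverse_nil, runF, runB] at this
      rw [this]
      simp [splitRef, Bool.or_assoc]
    · have hne : (c == '#') = false := by simp [hc]
      simp only [List.cons_append, List.foldl_cons, scanStep, hne, Bool.false_eq_true, if_false]
      have hF : (if cur.length < w.length then runF w w.length 0 cur.reverse && (c == w.getD cur.length ' ' || c == ' ') else runF w w.length 0 cur.reverse) = runF w w.length 0 (c :: cur).reverse := by
        rw [List.reverse_cons, runF_append]
        simp only [List.length_reverse, Nat.zero_add, runF, Bool.and_true]
        split_ifs <;> simp
      have hB : (if cur.length < w.length then runB w w.length 0 cur.reverse && (c == w.getD (w.length - 1 - cur.length) ' ' || c == ' ') else runB w w.length 0 cur.reverse) = runB w w.length 0 (c :: cur).reverse := by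
        rw [List.reverse_cons, runB_append]
        simp only [List.length_reverse, Nat.zero_add, runB, Bool.and_true]
        split_ifs <;> simp
      simp only [hF, hB]
      have hlen : cur.length + 1 = (c :: cur).length := rfl
      rw [hlen, ih (c :: cur) f0]
      simp [splitRef, hc]

theorem scanLine_eq (w line : List Char) :
    scanLine w w.length line
      = (PySem.Chars.splitOn line ['#']).any
          (fun s => s.length == w.length && (allMatchA w.length s w || allMatchA w.length s w.reverse)) := by
  unfold scanLine
  rw [splitOn_eq]
  have := scan_eq w line [] false
  simpa [runF, runB] using this

theorem any_or_split {α : Type} (l : List α) (p q : α → Bool) :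
    (l.any fun a => p a || q a) = (l.any p || l.any q) := by
  induction l with
  | nil => simp
  | cons a l ih => simp [ih]; ac_rfl

-- A's per-row check rewritten as B's streamed scan
theorem row_eq (w line : List Char) :
    (((PySem.Chars.splitOn line ['#']).any (fun s => s.length == w.length && allMatchA w.length s w))
      || ((PySem.Chars.splitOn line ['#']).any (fun s => s.length == w.length && allMatchA w.length s w.reverse)))
      = scanLine w w.length line := by
  rw [scanLine_eq]
  rw [← any_or_split]
  refine congrArg _ (funext fun s => ?_)
  cases h : (s.length == w.length) <;> simp

-- ===== VERDICT (by name: the statement is the Claim_ definition above) =====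
theorem placeWordInCrossword_spec : Claim_equal_placeWordInCrossword := by
  unfold Claim_equal_placeWordInCrossword
  intro board word _
  unfold Spec_placeWordInCrossword placeWordInCrossword placeWordInCrossword_alt
  simp only [List.any_cons, List.any_nil, Bool.or_false, List.any_append, List.any_map]
  refine congrArg₂ (· || ·) ?_ ?_ <;>
    exact List.any_congr rfl (fun row =>
      row_eq word.toList (PySem.Chars.join [] (row.map String.toList)))
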